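-- pv_equiv track=rewrite | github.com/jamesgimena/rhive-os | group_components.py | extract_main_desc
-- ===== SOURCE A (Python) =====
-- def extract_main_desc(desc):
--     main_desc = []
--     mode = 'desc'
--     lines = []
--     for line1 in desc.split('\n'):
--         for line2 in line1.split('\\n'):
--             lines.append(line2.strip())
--
--     for line in lines:
--         if 'EXECUTION BLUEPRINT' in line or 'Execution Blueprint' in line or 'The RHIVE' in line or 'System Details &' in line or 'Execution &' in line:
--             mode = 'blueprint'
--             continue
--         if 'INSTALLATION WARRANTY:' in line or 'MATERIALS WARRANTY:' in line:
--             continue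
--         if 'RHIVE CORE COMMITMENT' in line:
--             continue
--
--         if mode == 'desc' and line:
--             main_desc.append(line)
--
--     return ' '.join(main_desc) if main_desc else desc
-- ===== SOURCE B (Python) =====
-- def extract_main_desc(desc):
--     BLUEPRINT = ('EXECUTION BLUEPRINT', 'Execution Blueprint', 'The RHIVE',
--                  'System Details &', 'Execution &')
--     SKIP = ('INSTALLATION WARRANTY:', 'MATERIALS WARRANTY:', 'RHIVE CORE COMMITMENT')
--     # single cursor scan over the raw string: cut at the earliest of '\n' / '\\n',
--     # stop at the first blueprint-marker line; the flattened lines list is never built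
--     kept = []
--     pos = 0
--     while True:
--         i = desc.find('\n', pos)
--         j = desc.find('\\n', pos)
--         if j != -1 and (i == -1 or j < i):
--             end, nxt = j, j + 2
--         else:
--             end, nxt = i, i + 1
--         line = (desc[pos:end] if end != -1 else desc[pos:]).strip()
--         if ('EXECUTION BLUEPRINT' in line or 'Execution Blueprint' in line
--                 or 'The RHIVE' in line or 'System Details &' in line
--                 or 'Execution &' in line):
--             break
--         if line and not ('INSTALLATION WARRANTY:' in line
--                          or 'MATERIALS WARRANTY:' in line
--                          or 'RHIVE CORE COMMITMENT' in line):
--             kept.append(line)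
--         if end == -1:
--             break
--         pos = nxt
--     return ' '.join(kept) if kept else desc
-- ===== Notes on version B (the rewrite author's own statement) =====
-- stated objective: alternative
-- what changed: Replaces A's two-pass pipeline (build the flattened stripped lines list by nested str.split calls, then run a mode-flag state machine over it) by a single cursor scan over the raw string: two find pointers pick the earliest of the newline character and the two-character backslash-n escape, each segment is stripped and classified on the fly, and the scan stops at the first blueprint-marker line without ever materialising the lines list.
import Mathlib
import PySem

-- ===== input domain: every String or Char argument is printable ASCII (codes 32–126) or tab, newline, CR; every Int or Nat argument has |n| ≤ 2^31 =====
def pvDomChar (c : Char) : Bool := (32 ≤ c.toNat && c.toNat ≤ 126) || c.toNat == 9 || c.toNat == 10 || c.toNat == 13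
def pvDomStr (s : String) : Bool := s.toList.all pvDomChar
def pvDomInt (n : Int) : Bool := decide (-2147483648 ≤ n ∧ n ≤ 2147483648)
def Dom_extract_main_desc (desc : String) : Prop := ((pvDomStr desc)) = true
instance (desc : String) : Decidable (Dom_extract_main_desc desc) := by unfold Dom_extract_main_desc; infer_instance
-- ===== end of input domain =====

-- B replaces A's build-the-lines-list-then-run-a-mode-machine by a single cursor scan over the
-- raw string (two find pointers merging the separators '\n' and '\\n'), stopping at the first
-- blueprint line; the flattened lines list is never built (alternative decomposition).

-- ===== PORT A =====
-- the three compound 'X in line or …' conditions of A, named (each 'in' is PySem.Str.isIn)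
def pvIsBlueprint (line : String) : Bool :=
  PySem.Str.isIn "EXECUTION BLUEPRINT" line || PySem.Str.isIn "Execution Blueprint" line ||
  PySem.Str.isIn "The RHIVE" line || PySem.Str.isIn "System Details &" line ||
  PySem.Str.isIn "Execution &" line
def pvIsWarranty (line : String) : Bool :=
  PySem.Str.isIn "INSTALLATION WARRANTY:" line || PySem.Str.isIn "MATERIALS WARRANTY:" line
def pvIsCommit (line : String) : Bool :=
  PySem.Str.isIn "RHIVE CORE COMMITMENT" line

-- split with a non-empty literal separator never raises: .getD [] is never taken
def pvSplit (s sep : String) : List String := (PySem.Str.split? s sep).getD []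

def extract_main_desc (desc : String) : String :=
  let lines : List String :=
    (pvSplit desc "\n").foldl (fun acc line1 =>
      (pvSplit line1 "\\n").foldl (fun acc2 line2 =>
        acc2 ++ [PySem.Str.strip line2]) acc) []
  let st : String × List String :=
    lines.foldl (fun st line =>
      if pvIsBlueprint line then ("blueprint", st.2)
      else if pvIsWarranty line then st
      else if pvIsCommit line then st
      else if st.1 == "desc" && !(line == "") then (st.1, st.2 ++ [line])
      else st) ("desc", [])
  if st.2 ≠ [] then PySem.Str.join " " st.2 else desc

-- ===== PORT B =====
-- Source B's while loop over a cursor pos: here the cursor is represented by the remaining suffix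
-- cs of desc's characters, so desc.find(sep, pos) becomes a find on cs (indices relative to pos,
-- which shifts i and j alike and leaves every comparison and slice of the body unchanged);
-- the fuel argument (cs.length + 1 at the call) only makes the while-loop recursion total.
def pvScanGo : Nat → List Char → List String
  | 0, _ => []
  | fuel + 1, cs =>
    let i : Int := PySem.Chars.find cs "\n".toList
    let j : Int := PySem.Chars.find cs "\\n".toList
    let en : Int × Int := if j ≠ -1 ∧ (i = -1 ∨ j < i) then (j, j + 2) else (i, i + 1)
    let line : String :=
      String.ofList (PySem.Chars.strip (if en.1 ≠ -1 then cs.take en.1.toNat else cs))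
    if pvIsBlueprint line then []
    else
      (if !(line == "") && !(pvIsWarranty line || pvIsCommit line) then [line] else []) ++
      (if en.1 = -1 then [] else pvScanGo fuel (cs.drop en.2.toNat))

def extract_main_desc_alt (desc : String) : String :=
  let kept : List String := pvScanGo (desc.toList.length + 1) desc.toList
  if kept ≠ [] then PySem.Str.join " " kept else desc

-- ===== PRECONDITION & SPEC =====
def Spec_extract_main_desc (desc : String) (out : String) : Prop := out = extract_main_desc_alt desc
instance (desc : String) (out : String) : Decidable (Spec_extract_main_desc desc out) := by unfold Spec_extract_main_desc; infer_instance

-- ===== CLAIM (what is proved, stated in full; the proofs are below) =====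
def Claim_equal_extract_main_desc : Prop := ∀ (desc : String), Dom_extract_main_desc desc → Spec_extract_main_desc desc (extract_main_desc desc)

-- ===== LEMMAS AND PROOFS =====

-- prepend a char to the first segment of a segment list
def pvConsHead (c : Char) : List (List Char) → List (List Char)
  | [] => [[c]]
  | h :: t => (c :: h) :: t

-- apply f to the first segment only
def pvMapHead (f : List Char → List Char) : List (List Char) → List (List Char)
  | [] => []
  | h :: t => f h :: t

-- clean recursions computing s.split('\n'), s.split('\\n'), and the merged
-- earliest-separator segmentation on both separators at once
def pvSplitNL : List Char → List (List Char)
  | [] => [[]]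
  | c :: rest => if c = '\n' then [] :: pvSplitNL rest else pvConsHead c (pvSplitNL rest)

def pvSplitBS : List Char → List (List Char)
  | [] => [[]]
  | c :: rest =>
    if c = '\\' ∧ rest.head? = some 'n' then [] :: pvSplitBS rest.tail
    else pvConsHead c (pvSplitBS rest)
  termination_by cs => cs.length
  decreasing_by all_goals (simp [List.length_tail]; try omega)

def pvTok : List Char → List (List Char)
  | [] => [[]]
  | c :: rest =>
    if c = '\n' then [] :: pvTok rest
    else if c = '\\' ∧ rest.head? = some 'n' then [] :: pvTok rest.tail
    else pvConsHead c (pvTok rest)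
  termination_by cs => cs.length
  decreasing_by all_goals (simp [List.length_tail]; try omega)

-- the fused keep-loop: prefix before the first blueprint line, filtered
def pvKeep : List String → List String
  | [] => []
  | l :: ls =>
    if pvIsBlueprint l then []
    else (if !(l == "") && !(pvIsWarranty l || pvIsCommit l) then [l] else []) ++ pvKeep ls

lemma pvSplitNL_ne_nil (cs : List Char) : pvSplitNL cs ≠ [] := by
  cases cs with
  | nil => simp [pvSplitNL]
  | cons c rest =>
    rw [pvSplitNL]
    split
    · simp
    · cases h : pvSplitNL rest <;> simp [pvConsHead]

lemma pvSplitBS_ne_nil (cs : List Char) : pvSplitBS cs ≠ [] := by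
  cases cs with
  | nil => simp [pvSplitBS]
  | cons c rest =>
    rw [pvSplitBS]
    split
    · simp
    · cases h : pvSplitBS rest <;> simp [pvConsHead]

lemma pvMapHead_id (X : List (List Char)) :
    pvMapHead (fun h => h) X = X := by
  cases X <;> simp [pvMapHead]

lemma pvMapHead_consHead (cur : List Char) (c : Char) (X : List (List Char)) (hX : X ≠ []) :
    pvMapHead (fun h => cur.reverse ++ h) (pvConsHead c X)
      = pvMapHead (fun h => (c :: cur).reverse ++ h) X := by
  cases X with
  | nil => exact absurd rfl hX
  | cons h t => simp [pvConsHead, pvMapHead]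

-- PySem's splitOn.go computes any F with the splitOn step laws
lemma pv_go_eq (sep : List Char) (hsep : sep ≠ []) (F : List Char → List (List Char))
    (hF0 : F [] = [[]]) (hFne : ∀ l, F l ≠ [])
    (hFs : ∀ c rest, F (c :: rest) =
      if sep.isPrefixOf (c :: rest) then [] :: F (List.drop sep.length (c :: rest))
      else pvConsHead c (F rest)) :
    ∀ fuel l cur acc, l.length < fuel →
      PySem.Chars.splitOn.go sep fuel l cur acc
        = acc.reverse ++ pvMapHead (fun h => cur.reverse ++ h) (F l) := by
  intro fuel
  induction fuel with
  | zero => intro l cur acc h; omega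
  | succ n ih =>
    intro l cur acc h
    cases l with
    | nil =>
      simp [PySem.Chars.splitOn.go, hF0, pvMapHead]
    | cons c rest =>
      rw [PySem.Chars.splitOn.go, hFs]
      by_cases hp : sep.isPrefixOf (c :: rest)
      · have h1 : 1 ≤ sep.length := by cases sep <;> simp_all
        have hlen : (List.drop sep.length (c :: rest)).length < n := by
          simp only [List.length_drop, List.length_cons]
          simp only [List.length_cons] at h
          omega
        simp only [hp, if_true]
        rw [ih _ [] (cur.reverse :: acc) hlen]
        simp only [pvMapHead]
        cases F (List.drop sep.length (c :: rest)) <;> simp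
      · simp only [hp, if_false, Bool.false_eq_true]
        rw [ih rest (c :: cur) acc (by simp at h ⊢; omega)]
        rw [pvMapHead_consHead _ _ _ (hFne rest)]

lemma pvSplitNL_step (c : Char) (rest : List Char) :
    pvSplitNL (c :: rest) =
      if ("\n".toList).isPrefixOf (c :: rest)
      then [] :: pvSplitNL (List.drop ("\n".toList).length (c :: rest))
      else pvConsHead c (pvSplitNL rest) := by
  rw [pvSplitNL]
  by_cases hc : c = '\n'
  · simp [hc, List.isPrefixOf]
  · rw [if_neg hc]
    have hpre : (("\n".toList).isPrefixOf (c :: rest)) = false := by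
      simp [List.isPrefixOf]
      exact fun h => absurd h.symm hc
    simp only [hpre, Bool.false_eq_true, if_false]

lemma pvSplitBS_step (c : Char) (rest : List Char) :
    pvSplitBS (c :: rest) =
      if ("\\n".toList).isPrefixOf (c :: rest)
      then [] :: pvSplitBS (List.drop ("\\n".toList).length (c :: rest))
      else pvConsHead c (pvSplitBS rest) := by
  rw [pvSplitBS]
  by_cases hc : c = '\\' ∧ rest.head? = some 'n'
  · obtain ⟨hc1, hc2⟩ := hc
    cases rest with
    | nil => simp at hc2
    | cons r rs =>
      simp at hc2
      simp [hc1, hc2, List.isPrefixOf]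
  · rw [if_neg hc, if_neg]
    intro hpre
    apply hc
    cases rest with
    | nil => simp [List.isPrefixOf] at hpre
    | cons r rs =>
      simp [List.isPrefixOf] at hpre
      obtain ⟨h1, h2⟩ := hpre
      exact ⟨h1.symm, by simp [← h2]⟩

-- A's pvSplit in terms of the clean recursions
lemma pvSplit_nl (s : String) :
    pvSplit s "\n" = (pvSplitNL s.toList).map String.ofList := by
  have h := pv_go_eq "\n".toList (by decide) pvSplitNL rfl pvSplitNL_ne_nil pvSplitNL_step
    (s.toList.length + 1) s.toList [] [] (by omega)
  simp only [pvSplit, PySem.Str.split?, PySem.Chars.split?, PySem.Chars.splitOn]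
  rw [h]
  simp [pvMapHead_id]

lemma pvSplit_bs (s : String) :
    pvSplit s "\\n" = (pvSplitBS s.toList).map String.ofList := by
  have h := pv_go_eq "\\n".toList (by decide) pvSplitBS (by rw [pvSplitBS]) pvSplitBS_ne_nil pvSplitBS_step
    (s.toList.length + 1) s.toList [] [] (by omega)
  simp only [pvSplit, PySem.Str.split?, PySem.Chars.split?, PySem.Chars.splitOn]
  rw [h]
  simp [pvMapHead_id]


-- step-unfold lemmas for the proof-side recursions
lemma pvSplitNL_nl (rest : List Char) : pvSplitNL ('\n' :: rest) = [] :: pvSplitNL rest := by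
  rw [pvSplitNL, if_pos rfl]

lemma pvSplitNL_other (c : Char) (rest : List Char) (h : c ≠ '\n') :
    pvSplitNL (c :: rest) = pvConsHead c (pvSplitNL rest) := by
  rw [pvSplitNL, if_neg h]

lemma pvSplitBS_bs (rs : List Char) : pvSplitBS ('\\' :: 'n' :: rs) = [] :: pvSplitBS rs := by
  rw [pvSplitBS, if_pos ⟨rfl, rfl⟩]
  rfl

lemma pvSplitBS_other (c : Char) (rest : List Char) (h : ¬(c = '\\' ∧ rest.head? = some 'n')) :
    pvSplitBS (c :: rest) = pvConsHead c (pvSplitBS rest) := by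
  rw [pvSplitBS, if_neg h]

lemma pvTok_nil : pvTok [] = [[]] := by rw [pvTok]

lemma pvTok_nl (rest : List Char) : pvTok ('\n' :: rest) = [] :: pvTok rest := by
  rw [pvTok, if_pos rfl]

lemma pvTok_bs (rs : List Char) : pvTok ('\\' :: 'n' :: rs) = [] :: pvTok rs := by
  rw [pvTok, if_neg (by decide), if_pos ⟨rfl, rfl⟩]
  rfl

lemma pvTok_other (c : Char) (rest : List Char) (h1 : c ≠ '\n')
    (h2 : ¬(c = '\\' ∧ rest.head? = some 'n')) :
    pvTok (c :: rest) = pvConsHead c (pvTok rest) := by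
  rw [pvTok, if_neg h1, if_neg h2]

-- the head of the first segment of split('\n') is the head of the input, unless that is '\n'
lemma pvSplitNL_head_head (l : List Char) (h : List Char) (t : List (List Char))
    (hl : pvSplitNL l = h :: t) : (h.head? = some 'n' ↔ l.head? = some 'n') := by
  cases l with
  | nil =>
    rw [pvSplitNL] at hl
    injection hl with h1 _
    rw [← h1]
  | cons r rs =>
    by_cases hr : r = '\n'
    · subst hr
      rw [pvSplitNL_nl] at hl
      injection hl with h1 _
      rw [← h1]
      simp only [List.head?_nil, List.head?_cons]
      decide
    · rw [pvSplitNL_other r rs hr] at hl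
      cases hX : pvSplitNL rs with
      | nil => exact absurd hX (pvSplitNL_ne_nil rs)
      | cons h' t' =>
        rw [hX] at hl
        simp only [pvConsHead] at hl
        injection hl with h1 _
        rw [← h1]
        simp only [List.head?_cons]

lemma pvConsHead_append (c : Char) (X Y : List (List Char)) (hX : X ≠ []) :
    pvConsHead c X ++ Y = pvConsHead c (X ++ Y) := by
  cases X with
  | nil => exact absurd rfl hX
  | cons h t => simp [pvConsHead]

-- nested split = merged earliest-separator segmentation
lemma pv_flat_tok (cs : List Char) :
    (pvSplitNL cs).flatMap pvSplitBS = pvTok cs := by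
  induction hn : cs.length using Nat.strong_induction_on generalizing cs with
  | _ n ih =>
  cases cs with
  | nil => rw [pvSplitNL, pvTok_nil]; simp [pvSplitBS]
  | cons c rest =>
    by_cases hc : c = '\n'
    · subst hc
      rw [pvSplitNL_nl, pvTok_nl, List.flatMap_cons]
      rw [pvSplitBS]
      rw [ih rest.length (by simp at hn; omega) rest rfl]
      simp
    · by_cases hbs : c = '\\' ∧ rest.head? = some 'n'
      · obtain ⟨hc1, hc2⟩ := hbs
        subst hc1
        cases rest with
        | nil => simp at hc2
        | cons r rs =>
          simp only [List.head?_cons, Option.some.injEq] at hc2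
          subst hc2
          rw [pvTok_bs]
          rw [pvSplitNL_other _ _ (by decide)]
          rw [pvSplitNL_other 'n' rs (by decide)]
          cases hX : pvSplitNL rs with
          | nil => exact absurd hX (pvSplitNL_ne_nil rs)
          | cons h t =>
            simp only [pvConsHead, List.flatMap_cons]
            rw [pvSplitBS_bs]
            have : pvSplitBS h ++ t.flatMap pvSplitBS = (h :: t).flatMap pvSplitBS := by
              simp [List.flatMap_cons]
            simp only [List.cons_append, this, ← hX]
            rw [ih rs.length (by simp at hn; omega) rs rfl]
      · rw [pvTok_other c rest hc hbs, pvSplitNL_other c rest hc]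
        cases hX : pvSplitNL rest with
        | nil => exact absurd hX (pvSplitNL_ne_nil rest)
        | cons h t =>
          simp only [pvConsHead, List.flatMap_cons]
          have hbsh : ¬(c = '\\' ∧ h.head? = some 'n') := by
            intro ⟨h1, h2⟩
            exact hbs ⟨h1, (pvSplitNL_head_head rest h t hX).mp h2⟩
          rw [pvSplitBS_other c h hbsh]
          rw [pvConsHead_append _ _ _ (pvSplitBS_ne_nil h)]
          rw [← List.flatMap_cons, ← hX]
          rw [ih rest.length (by simp at hn; omega) rest rfl]
          rfl

-- characterization of Python's str.find scanner (PySem.Chars.find.go)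
lemma pv_go_nil (sub : List Char) (k : Nat) :
    PySem.Chars.find.go sub [] k = if sub.isEmpty then (k : Int) else -1 := rfl

lemma pv_go_cons (sub : List Char) (c : Char) (rest : List Char) (k : Nat) :
    PySem.Chars.find.go sub (c :: rest) k =
      if sub.isPrefixOf (c :: rest) then (k : Int)
      else PySem.Chars.find.go sub rest (k + 1) := rfl

lemma pv_go_ge' (sub : List Char) : ∀ (l : List Char) (k : Nat),
    PySem.Chars.find.go sub l k = -1 ∨ (k : Int) ≤ PySem.Chars.find.go sub l k := by
  intro l
  induction l with
  | nil =>
    intro k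
    rw [pv_go_nil]
    by_cases hE : sub.isEmpty <;> simp [hE]
  | cons c rest ih =>
    intro k
    rw [pv_go_cons]
    by_cases hp : sub.isPrefixOf (c :: rest)
    · simp [hp]
    · simp only [hp, Bool.false_eq_true, if_false]
      rcases ih (k + 1) with h | h
      · exact Or.inl h
      · right; push_cast at h ⊢; omega

lemma pv_go_ge (sub : List Char) (l : List Char) :
    PySem.Chars.find.go sub l 0 = -1 ∨ 0 ≤ PySem.Chars.find.go sub l 0 := by
  simpa using pv_go_ge' sub l 0

lemma pv_go_shift (sub : List Char) (hsub : sub ≠ []) :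
    ∀ (l : List Char) (k : Nat), PySem.Chars.find.go sub l k =
      if PySem.Chars.find.go sub l 0 = -1 then -1
      else (k : Int) + PySem.Chars.find.go sub l 0 := by
  intro l
  induction l with
  | nil =>
    intro k
    have hE : sub.isEmpty = false := by cases sub <;> simp_all
    rw [pv_go_nil, pv_go_nil, hE]
    simp
  | cons c rest ih =>
    intro k
    rw [pv_go_cons, pv_go_cons]
    by_cases hp : sub.isPrefixOf (c :: rest)
    · simp [hp]
    · simp only [hp, Bool.false_eq_true, if_false]
      rw [ih (k + 1), ih (0 + 1)]
      by_cases h0 : PySem.Chars.find.go sub rest 0 = -1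
      · simp [h0]
      · have hge : 0 ≤ PySem.Chars.find.go sub rest 0 := (pv_go_ge sub rest).resolve_left h0
        rw [if_neg h0, if_neg h0, if_neg (by push_cast; omega)]
        push_cast
        ring

lemma pv_find_ge (sub l : List Char) :
    PySem.Chars.find l sub = -1 ∨ 0 ≤ PySem.Chars.find l sub := pv_go_ge sub l

lemma pv_find_nil (sub : List Char) (hsub : sub ≠ []) : PySem.Chars.find [] sub = -1 := by
  have hE : sub.isEmpty = false := by cases sub <;> simp_all
  show PySem.Chars.find.go sub [] 0 = -1
  rw [pv_go_nil, hE]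
  simp

lemma pv_find_cons (sub : List Char) (hsub : sub ≠ []) (c : Char) (rest : List Char) :
    PySem.Chars.find (c :: rest) sub =
      if sub.isPrefixOf (c :: rest) then 0
      else if PySem.Chars.find rest sub = -1 then -1 else PySem.Chars.find rest sub + 1 := by
  show PySem.Chars.find.go sub (c :: rest) 0 = _
  rw [pv_go_cons]
  by_cases hp : sub.isPrefixOf (c :: rest)
  · simp [hp]
  · simp only [hp, Bool.false_eq_true, if_false]
    rw [pv_go_shift sub hsub rest (0 + 1)]
    show _ = if PySem.Chars.find.go sub rest 0 = -1 then -1 else PySem.Chars.find.go sub rest 0 + 1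
    by_cases h0 : PySem.Chars.find.go sub rest 0 = -1
    · simp [h0]
    · simp only [h0, if_false]
      omega

lemma pv_pre_nl (c : Char) (rest : List Char) :
    ("\n".toList).isPrefixOf (c :: rest) = true ↔ c = '\n' := by
  simp [List.isPrefixOf]
  exact ⟨fun h => h.symm, fun h => h.symm⟩

lemma pv_pre_bs (c : Char) (rest : List Char) :
    ("\\n".toList).isPrefixOf (c :: rest) = true ↔ (c = '\\' ∧ rest.head? = some 'n') := by
  cases rest with
  | nil => simp [List.isPrefixOf]
  | cons r rs =>
    simp [List.isPrefixOf]
    constructor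
    · rintro ⟨h1, h2⟩; exact ⟨h1.symm, h2.symm⟩
    · rintro ⟨h1, h2⟩; exact ⟨h1.symm, h2.symm⟩

lemma pv_find_nl_cons (c : Char) (rest : List Char) :
    PySem.Chars.find (c :: rest) "\n".toList =
      if c = '\n' then 0
      else if PySem.Chars.find rest "\n".toList = -1 then -1
      else PySem.Chars.find rest "\n".toList + 1 := by
  rw [pv_find_cons _ (by decide) c rest]
  by_cases hc : c = '\n'
  · rw [if_pos ((pv_pre_nl c rest).mpr hc), if_pos hc]
  · rw [if_neg (fun h => hc ((pv_pre_nl c rest).mp h)), if_neg hc]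

lemma pv_find_bs_cons (c : Char) (rest : List Char) :
    PySem.Chars.find (c :: rest) "\\n".toList =
      if c = '\\' ∧ rest.head? = some 'n' then 0
      else if PySem.Chars.find rest "\\n".toList = -1 then -1
      else PySem.Chars.find rest "\\n".toList + 1 := by
  rw [pv_find_cons _ (by decide) c rest]
  by_cases hc : c = '\\' ∧ rest.head? = some 'n'
  · rw [if_pos ((pv_pre_bs c rest).mpr hc), if_pos hc]
  · rw [if_neg (fun h => hc ((pv_pre_bs c rest).mp h)), if_neg hc]

-- the merged segmentation, cut at the earliest find of either separator (the three loop branches)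
lemma pv_tok_cut : ∀ (cs : List Char),
    (PySem.Chars.find cs "\n".toList = -1 → PySem.Chars.find cs "\\n".toList = -1 →
      pvTok cs = [cs])
  ∧ (PySem.Chars.find cs "\\n".toList ≠ -1 →
      (PySem.Chars.find cs "\n".toList = -1 ∨
        PySem.Chars.find cs "\\n".toList < PySem.Chars.find cs "\n".toList) →
      pvTok cs = cs.take (PySem.Chars.find cs "\\n".toList).toNat
        :: pvTok (cs.drop ((PySem.Chars.find cs "\\n".toList).toNat + 2)))
  ∧ (¬(PySem.Chars.find cs "\\n".toList ≠ -1 ∧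
        (PySem.Chars.find cs "\n".toList = -1 ∨
          PySem.Chars.find cs "\\n".toList < PySem.Chars.find cs "\n".toList)) →
      PySem.Chars.find cs "\n".toList ≠ -1 →
      pvTok cs = cs.take (PySem.Chars.find cs "\n".toList).toNat
        :: pvTok (cs.drop ((PySem.Chars.find cs "\n".toList).toNat + 1))) := by
  intro cs
  induction cs with
  | nil =>
    refine ⟨fun _ _ => pvTok_nil,
            fun hj _ => absurd (pv_find_nil _ (by decide)) hj,
            fun _ hi => absurd (pv_find_nil _ (by decide)) hi⟩
  | cons c rest ih =>
    obtain ⟨ihc, iha, ihb⟩ := ih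
    have hnl := pv_find_nl_cons c rest
    have hbs := pv_find_bs_cons c rest
    have hgei := pv_find_ge "\n".toList rest
    have hgej := pv_find_ge "\\n".toList rest
    by_cases hc : c = '\n'
    · subst hc
      rw [if_pos rfl] at hnl
      rw [if_neg (fun h => absurd h.1 (by decide))] at hbs
      refine ⟨fun h1 _ => by rw [hnl] at h1; exact absurd h1 (by decide),
              fun hj hd => ?_, fun _ _ => ?_⟩
      · exfalso
        rw [hnl] at hd
        rw [hbs] at hj hd
        by_cases h0 : PySem.Chars.find rest "\\n".toList = -1
        · rw [if_pos h0] at hj; exact hj rfl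
        · rw [if_neg h0] at hj hd
          rcases hgej with h | h
          · exact h0 h
          · rcases hd with h' | h' <;> omega
      · rw [hnl]
        simp [pvTok_nl]
    · by_cases hb2 : c = '\\' ∧ rest.head? = some 'n'
      · rw [if_pos hb2] at hbs
        rw [if_neg hc] at hnl
        obtain ⟨hbc1, hbc2⟩ := hb2
        subst hbc1
        cases rest with
        | nil => simp at hbc2
        | cons r rs =>
          simp only [List.head?_cons, Option.some.injEq] at hbc2
          subst hbc2
          refine ⟨fun _ h2 => by rw [hbs] at h2; exact absurd h2 (by decide),
                  fun _ _ => ?_, fun hno hi => ?_⟩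
          · rw [hbs]
            simp [pvTok_bs]
          · exfalso
            apply hno
            rw [hbs, hnl]
            rw [hnl] at hi
            by_cases h0 : PySem.Chars.find ('n' :: rs) "\n".toList = -1
            · rw [if_pos h0] at hi; exact absurd rfl hi
            · rw [if_neg h0] at hi ⊢
              rcases hgei with h | h
              · exact absurd h h0
              · exact ⟨by decide, Or.inr (by omega)⟩
      · rw [if_neg hc] at hnl
        rw [if_neg hb2] at hbs
        have htok := pvTok_other c rest hc hb2
        refine ⟨fun h1 h2 => ?_, fun hj hd => ?_, fun hno hi => ?_⟩
        · -- both -1: so both -1 on rest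
          rw [hnl] at h1
          rw [hbs] at h2
          have hi' : PySem.Chars.find rest "\n".toList = -1 := by
            by_cases h0 : PySem.Chars.find rest "\n".toList = -1
            · exact h0
            · rw [if_neg h0] at h1; rcases hgei with h | h; exact h; omega
          have hj' : PySem.Chars.find rest "\\n".toList = -1 := by
            by_cases h0 : PySem.Chars.find rest "\\n".toList = -1
            · exact h0
            · rw [if_neg h0] at h2; rcases hgej with h | h; exact h; omega
          rw [htok, ihc hi' hj']
          rfl
        · -- earliest separator is '\\n', at j'+1 in c::rest
          rw [hbs] at hj hd ⊢
          have hj0 : PySem.Chars.find rest "\\n".toList ≠ -1 := by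
            intro h0; rw [if_pos h0] at hj; exact hj rfl
          have hjge : 0 ≤ PySem.Chars.find rest "\\n".toList := by
            rcases hgej with h | h; exact absurd h hj0; exact h
          rw [if_neg hj0] at hj hd ⊢
          have hd' : PySem.Chars.find rest "\n".toList = -1 ∨
              PySem.Chars.find rest "\\n".toList < PySem.Chars.find rest "\n".toList := by
            rw [hnl] at hd
            by_cases h0 : PySem.Chars.find rest "\n".toList = -1
            · exact Or.inl h0
            · rw [if_neg h0] at hd
              rcases hd with h | h
              · rcases hgei with hh | hh; exact absurd hh h0; omega
              · exact Or.inr (by omega)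
          rw [htok, iha hj0 hd']
          have ht : (PySem.Chars.find rest "\\n".toList + 1).toNat
              = (PySem.Chars.find rest "\\n".toList).toNat + 1 := by omega
          rw [ht]
          simp [pvConsHead, List.take_succ_cons, List.drop_succ_cons]
        · -- earliest separator is '\n', at i'+1 in c::rest
          rw [hnl] at hi ⊢
          have hi0 : PySem.Chars.find rest "\n".toList ≠ -1 := by
            intro h0; rw [if_pos h0] at hi; exact hi rfl
          have hige : 0 ≤ PySem.Chars.find rest "\n".toList := by
            rcases hgei with h | h; exact absurd h hi0; exact h
          rw [if_neg hi0] at hi ⊢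
          have hno' : ¬(PySem.Chars.find rest "\\n".toList ≠ -1 ∧
              (PySem.Chars.find rest "\n".toList = -1 ∨
                PySem.Chars.find rest "\\n".toList < PySem.Chars.find rest "\n".toList)) := by
            rintro ⟨hj0, hd0⟩
            apply hno
            rw [hbs, if_neg hj0, hnl, if_neg hi0]
            have hjge : 0 ≤ PySem.Chars.find rest "\\n".toList := by
              rcases hgej with h | h; exact absurd h hj0; exact h
            refine ⟨by omega, ?_⟩
            rcases hd0 with h | h
            · exact absurd h hi0
            · exact Or.inr (by omega)
          rw [htok, ihb hno' hi0]
          have ht : (PySem.Chars.find rest "\n".toList + 1).toNat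
              = (PySem.Chars.find rest "\n".toList).toNat + 1 := by omega
          rw [ht]
          simp [pvConsHead, List.take_succ_cons, List.drop_succ_cons]

-- B's loop computes the fused keep over the merged segmentation
lemma pv_scan : ∀ (fuel : Nat) (cs : List Char), cs.length < fuel →
    pvScanGo fuel cs
      = pvKeep ((pvTok cs).map (fun seg => String.ofList (PySem.Chars.strip seg))) := by
  intro fuel
  induction fuel with
  | zero => intro cs h; omega
  | succ n ih =>
    intro cs h
    simp only [pvScanGo]
    by_cases hcond : PySem.Chars.find cs "\\n".toList ≠ -1 ∧
        (PySem.Chars.find cs "\n".toList = -1 ∨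
          PySem.Chars.find cs "\\n".toList < PySem.Chars.find cs "\n".toList)
    · rw [if_pos hcond]
      have hj0 := hcond.1
      have hjge : 0 ≤ PySem.Chars.find cs "\\n".toList :=
        (pv_find_ge _ cs).resolve_left hj0
      have hne : cs ≠ [] := by
        intro hcs; subst hcs; exact hj0 (pv_find_nil _ (by decide))
      simp only [if_neg hj0, if_pos hj0]
      rw [(pv_tok_cut cs).2.1 hcond.1 hcond.2]
      rw [List.map_cons, pvKeep]
      have ht : (PySem.Chars.find cs "\\n".toList + 2).toNat
          = (PySem.Chars.find cs "\\n".toList).toNat + 2 := by omega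
      rw [ht, ih (cs.drop ((PySem.Chars.find cs "\\n".toList).toNat + 2))
        (by have := List.length_pos_iff.mpr hne; simp [List.length_drop]; omega)]
    · rw [if_neg hcond]
      by_cases hi : PySem.Chars.find cs "\n".toList = -1
      · have hj : PySem.Chars.find cs "\\n".toList = -1 := by
          by_contra hj0
          exact hcond ⟨hj0, Or.inl hi⟩
        simp only [if_pos hi, if_neg (show ¬(PySem.Chars.find cs "\n".toList ≠ -1) from fun hh => hh hi)]
        rw [(pv_tok_cut cs).1 hi hj]
        rw [List.map_cons, List.map_nil, pvKeep]
        simp [pvKeep]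
      · have hige : 0 ≤ PySem.Chars.find cs "\n".toList :=
          (pv_find_ge _ cs).resolve_left hi
        have hne : cs ≠ [] := by
          intro hcs; subst hcs; exact hi (pv_find_nil _ (by decide))
        simp only [if_neg hi, if_pos hi]
        rw [(pv_tok_cut cs).2.2 hcond hi]
        rw [List.map_cons, pvKeep]
        have ht : (PySem.Chars.find cs "\n".toList + 1).toNat
            = (PySem.Chars.find cs "\n".toList).toNat + 1 := by omega
        rw [ht, ih (cs.drop ((PySem.Chars.find cs "\n".toList).toNat + 1))
          (by have := List.length_pos_iff.mpr hne; simp [List.length_drop]; omega)]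

-- ===== A-side: the nested flattening loop and the mode machine =====
lemma pv_inner (ys : List String) (acc : List String) :
    ys.foldl (fun acc2 l2 => acc2 ++ [PySem.Str.strip l2]) acc = acc ++ ys.map PySem.Str.strip := by
  induction ys generalizing acc with
  | nil => simp [List.foldl]
  | cons y ys ih => simp [List.foldl, ih]

lemma pv_flatten (xs : List String) (acc : List String) :
    xs.foldl (fun acc line1 =>
      (pvSplit line1 "\\n").foldl (fun acc2 line2 => acc2 ++ [PySem.Str.strip line2]) acc) acc
    = acc ++ xs.flatMap (fun part => (pvSplit part "\\n").map PySem.Str.strip) := by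
  induction xs generalizing acc with
  | nil => simp [List.foldl]
  | cons x xs ih =>
    rw [List.foldl_cons, pv_inner, ih, List.flatMap_cons, List.append_assoc]

-- once mode is 'blueprint', the accumulator never changes
lemma pv_loop_bp (lines : List String) (md : List String) :
    (lines.foldl (fun st line =>
      if pvIsBlueprint line then (("blueprint" : String), st.2)
      else if pvIsWarranty line then st
      else if pvIsCommit line then st
      else if st.1 == "desc" && !(line == "") then (st.1, st.2 ++ [line])
      else st) (("blueprint" : String), md)).2 = md := by
  induction lines generalizing md with
  | nil => rfl
  | cons l ls ih =>
    simp only [List.foldl_cons]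
    split_ifs <;> simp_all

-- in mode 'desc', A's loop appends exactly the fused keep of the lines
lemma pv_loop_desc (lines : List String) (md : List String) :
    (lines.foldl (fun st line =>
      if pvIsBlueprint line then (("blueprint" : String), st.2)
      else if pvIsWarranty line then st
      else if pvIsCommit line then st
      else if st.1 == "desc" && !(line == "") then (st.1, st.2 ++ [line])
      else st) (("desc" : String), md)).2 = md ++ pvKeep lines := by
  induction lines generalizing md with
  | nil => simp [pvKeep]
  | cons l ls ih =>
    simp only [List.foldl_cons, pvKeep]
    cases hbp : pvIsBlueprint l with
    | true => simpa [hbp] using pv_loop_bp ls md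
    | false =>
      cases hw : pvIsWarranty l with
      | true => simpa [hbp, hw] using ih md
      | false =>
        cases hc : pvIsCommit l with
        | true => simpa [hbp, hw, hc] using ih md
        | false =>
          cases he : (l == "") with
          | true => simpa [hbp, hw, hc, he] using ih md
          | false => simpa [hbp, hw, hc, he] using ih (md ++ [l])

-- A's flattened lines list is the merged segmentation, stripped
lemma pv_lines_eq (desc : String) :
    (pvSplit desc "\n").flatMap (fun part => (pvSplit part "\\n").map PySem.Str.strip)
      = (pvTok desc.toList).map (fun seg => String.ofList (PySem.Chars.strip seg)) := by
  rw [pvSplit_nl]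
  rw [List.flatMap_map]
  have hstep : ∀ seg : List Char,
      (pvSplit (String.ofList seg) "\\n").map PySem.Str.strip
        = (pvSplitBS seg).map (fun x => String.ofList (PySem.Chars.strip x)) := by
    intro seg
    rw [pvSplit_bs]
    simp [PySem.Str.strip, Function.comp]
  calc (pvSplitNL desc.toList).flatMap
        (fun seg => (pvSplit (String.ofList seg) "\\n").map PySem.Str.strip)
      = (pvSplitNL desc.toList).flatMap
        (fun seg => (pvSplitBS seg).map (fun x => String.ofList (PySem.Chars.strip x))) := by
        exact List.flatMap_congr (fun seg _ => hstep seg)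
    _ = ((pvSplitNL desc.toList).flatMap pvSplitBS).map
        (fun x => String.ofList (PySem.Chars.strip x)) := by
        rw [List.map_flatMap]
    _ = (pvTok desc.toList).map (fun x => String.ofList (PySem.Chars.strip x)) := by
        rw [pv_flat_tok]

-- ===== VERDICT (by name: the statement is the Claim_ definition above) =====
theorem extract_main_desc_spec : Claim_equal_extract_main_desc := by
  intro desc _
  show extract_main_desc desc = extract_main_desc_alt desc
  simp only [extract_main_desc, extract_main_desc_alt]
  rw [pv_flatten, pv_loop_desc, pv_lines_eq,
    pv_scan (desc.toList.length + 1) desc.toList (by omega)]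
  simp
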